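-- pv_equiv track=rewrite | github.com/idanhovav/workspacePython | combos.py | findCombos
-- ===== SOURCE A (Python) =====
-- def findCombos(steps, lst, options):
--   if (steps == 0):
--     return [lst]
--   if (len(options) == 0 or steps < 0):
--     return []
--   #biggest = options[0]
--   results = []
--   for option in options:
--     results += findCombos(steps - option, lst + [option], options)
--   return results
-- ===== SOURCE B (Python) =====
-- def findCombos(steps, lst, options):
--     results = []
--     stack = [(steps, lst)]
--     while stack:
--         rem, prefix = stack.pop()
--         if rem == 0:
--             results.append(prefix)
--         elif rem < 0 or not options:
--             continue
--         else:
--             for option in reversed(options):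
--                 stack.append((rem - option, prefix + [option]))
--     return results
-- ===== Notes on version B (the rewrite author's own statement) =====
-- stated objective: alternative
-- what changed: Replaces A's recursive DFS (list concatenation at each level) with an iterative explicit-stack DFS that appends each completed composition once, pushing children in reversed order to preserve A's left-to-right leaf order.
import Mathlib
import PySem

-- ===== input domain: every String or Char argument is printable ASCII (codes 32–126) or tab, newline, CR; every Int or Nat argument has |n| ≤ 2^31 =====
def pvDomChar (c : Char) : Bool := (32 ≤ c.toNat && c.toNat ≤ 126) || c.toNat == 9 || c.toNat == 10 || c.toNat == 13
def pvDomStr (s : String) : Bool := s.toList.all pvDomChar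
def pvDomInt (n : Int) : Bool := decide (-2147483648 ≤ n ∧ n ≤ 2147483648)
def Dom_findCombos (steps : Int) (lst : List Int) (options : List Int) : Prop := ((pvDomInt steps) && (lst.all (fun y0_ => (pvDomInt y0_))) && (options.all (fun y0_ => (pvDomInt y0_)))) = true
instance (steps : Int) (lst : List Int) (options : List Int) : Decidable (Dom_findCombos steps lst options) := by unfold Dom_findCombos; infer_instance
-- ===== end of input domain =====

-- B replaces A's recursive DFS by an iterative explicit-stack DFS, pushing children
-- in reversed order so the leaf order matches A's; same cost (objective: alternative).

-- ===== PORT A =====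
-- A's recursion, with a Nat fuel making it total in Lean; inside Pre_ (all options
-- positive) the recursion depth is < steps.toNat + 1, so the fuel never runs out.
def findCombosFuel (fuel : Nat) (steps : Int) (lst : List Int) (options : List Int) : List (List Int) :=
  match fuel with
  | 0 => []
  | f + 1 =>
    if steps = 0 then [lst]
    else if options.length = 0 ∨ steps < 0 then []
    else options.foldl (fun results option => results ++ findCombosFuel f (steps - option) (lst ++ [option]) options) []

def findCombos (steps : Int) (lst : List Int) (options : List Int) : List (List Int) :=
  findCombosFuel (steps.toNat + 1) steps lst options

-- ===== PORT B =====
-- B's while-loop over the explicit stack, with fuel counting popped states.  The Lean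
-- list holds the Python stack top-first (Python pops from the end), so Python's
-- "append children in reversed(options) order" is "options.map … ++ rest" here.
def altLoop (options : List Int) (fuel : Nat) (stack : List (Int × List Int)) (results : List (List Int)) : List (List Int) :=
  match fuel, stack with
  | 0, _ => results
  | _ + 1, [] => results
  | f + 1, (rem, pref) :: rest =>
    if rem = 0 then altLoop options f rest (results ++ [pref])
    else if rem < 0 ∨ options.length = 0 then altLoop options f rest results
    else altLoop options f ((options.map (fun o => (rem - o, pref ++ [o]))) ++ rest) results

def findCombos_alt (steps : Int) (lst : List Int) (options : List Int) : List (List Int) :=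
  altLoop options ((options.length + 1) ^ (steps.toNat + 1)) [(steps, lst)] []

-- ===== PRECONDITION & SPEC =====
-- Pre_ excludes steps > 0 together with a nonpositive option: there Python A recurses
-- forever (steps never decreases), so A returns on no such input.
def Pre_findCombos (steps : Int) (lst : List Int) (options : List Int) : Prop :=
  steps ≤ 0 ∨ ∀ o ∈ options, 0 < o
instance (steps : Int) (lst : List Int) (options : List Int) : Decidable (Pre_findCombos steps lst options) := by unfold Pre_findCombos; infer_instance
def pvWitness_findCombos : Int × List Int × List Int := (4, [], [1, 2])

def Spec_findCombos (steps : Int) (lst : List Int) (options : List Int) (out : List (List Int)) : Prop := out = findCombos_alt steps lst options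
instance (steps : Int) (lst : List Int) (options : List Int) (out : List (List Int)) : Decidable (Spec_findCombos steps lst options out) := by unfold Spec_findCombos; infer_instance

-- ===== CLAIM (what is proved, stated in full; the proofs are below) =====
def Claim_equal_findCombos : Prop := ∀ (steps : Int) (lst : List Int) (options : List Int), Dom_findCombos steps lst options → Pre_findCombos steps lst options → Spec_findCombos steps lst options (findCombos steps lst options)

-- ===== LEMMAS AND PROOFS =====

lemma altLoop_nil (options : List Int) (f : Nat) (res : List (List Int)) :
    altLoop options f [] res = res := by cases f <;> rfl

-- fuel stability of A's recursion when every option is positive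
lemma fuel_stable (options : List Int) (hpos : ∀ o ∈ options, 0 < o) :
    ∀ f (steps : Int) (lst : List Int), steps.toNat < f →
      findCombosFuel f steps lst options = findCombosFuel (steps.toNat + 1) steps lst options := by
  intro f
  induction f using Nat.strong_induction_on with
  | _ f ih =>
    intro steps lst hf
    match f, hf with
    | f' + 1, hf =>
      simp only [findCombosFuel]
      split
      · rfl
      · split
        · rfl
        · rename_i h0 hne
          have hpos' : 0 < steps := by
            rcases lt_trichotomy steps 0 with h | h | h
            · exact absurd (Or.inr h) hne
            · exact absurd h h0
            · exact h
          apply PySem.List.foldl_congr_mem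
          intro acc o ho
          have hop := hpos o ho
          have hlt : (steps - o).toNat < steps.toNat := by omega
          have h1 : findCombosFuel f' (steps - o) (lst ++ [o]) options
              = findCombosFuel ((steps - o).toNat + 1) (steps - o) (lst ++ [o]) options := by
            rcases Nat.lt_or_ge (steps - o).toNat f' with h | h
            · exact ih f' (Nat.lt_succ_self _) _ _ h
            · omega
          have h2 : findCombosFuel steps.toNat (steps - o) (lst ++ [o]) options
              = findCombosFuel ((steps - o).toNat + 1) (steps - o) (lst ++ [o]) options :=
            ih steps.toNat (by omega) _ _ hlt
          rw [h1, h2]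

-- the canonical value of A's recursion
lemma altLoop_main (options : List Int) (hpos : ∀ o ∈ options, 0 < o) :
    ∀ fuel (stack : List (Int × List Int)) (results : List (List Int)),
      (stack.map (fun rp => (options.length + 1) ^ (rp.1.toNat + 1))).sum ≤ fuel →
      altLoop options fuel stack results
        = results ++ stack.flatMap (fun rp => findCombosFuel (rp.1.toNat + 1) rp.1 rp.2 options) := by
  intro fuel
  induction fuel with
  | zero =>
    intro stack results h
    cases stack with
    | nil => simp [altLoop]
    | cons hd tl =>
      exfalso
      have : 1 ≤ (options.length + 1) ^ (hd.1.toNat + 1) := Nat.one_le_pow _ _ (by omega)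
      simp only [List.map_cons, List.sum_cons, Nat.le_zero] at h
      omega
  | succ f ih =>
    intro stack results h
    cases stack with
    | nil => simp [altLoop]
    | cons hd tl =>
    obtain ⟨rem, pref⟩ := hd
    have hc1 : 1 ≤ (options.length + 1) ^ (rem.toNat + 1) := Nat.one_le_pow _ _ (by omega)
    simp only [List.map_cons, List.sum_cons] at h
    simp only [altLoop]
    split
    · rename_i h0
      subst h0
      rw [ih tl _ (by omega)]
      simp [findCombosFuel, List.flatMap_cons]
    · split
      · rename_i h0 hbad
        rw [ih tl _ (by omega)]
        have : findCombosFuel (rem.toNat + 1) rem pref options = [] := by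
          simp only [findCombosFuel]
          rw [if_neg h0, if_pos (by tauto)]
        simp [List.flatMap_cons, this]
      · rename_i h0 hne
        have hpos' : 0 < rem := by
          rcases lt_trichotomy rem 0 with hh | hh | hh
          · exact absurd (Or.inl hh) hne
          · exact absurd hh h0
          · exact hh
        have hk : options.length ≠ 0 := fun hk => hne (Or.inr hk)
        -- fuel bound for the expanded stack
        have hboundEach : ∀ rp ∈ (options.map (fun o => (rem - o, pref ++ [o]))),
            (options.length + 1) ^ (rp.1.toNat + 1) ≤ (options.length + 1) ^ rem.toNat := by
          rintro rp hrp
          obtain ⟨o, ho, rfl⟩ := List.mem_map.mp hrp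
          have := hpos o ho
          exact Nat.pow_le_pow_right (by omega) (by simp; omega)
        have hsumChildren :
            ((options.map (fun o => (rem - o, pref ++ [o]))).map
              (fun rp => (options.length + 1) ^ (rp.1.toNat + 1))).sum
              ≤ options.length * (options.length + 1) ^ rem.toNat := by
          calc _ ≤ ((options.map (fun o => (rem - o, pref ++ [o]))).map
                    (fun rp => (options.length + 1) ^ (rp.1.toNat + 1))).length
                    • ((options.length + 1) ^ rem.toNat) :=
                List.sum_le_card_nsmul _ _ (by
                  intro x hx
                  obtain ⟨rp, hrp, rfl⟩ := List.mem_map.mp hx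
                  exact hboundEach rp hrp)
            _ = options.length * (options.length + 1) ^ rem.toNat := by
                simp [smul_eq_mul]
        have hpow : (options.length + 1) ^ (rem.toNat + 1)
            = options.length * (options.length + 1) ^ rem.toNat + (options.length + 1) ^ rem.toNat := by
          rw [pow_succ]; ring
        have hpow1 : 1 ≤ (options.length + 1) ^ rem.toNat := Nat.one_le_pow _ _ (by omega)
        rw [ih _ _ (by rw [List.map_append, List.sum_append]; omega)]
        rw [List.flatMap_append, List.flatMap_cons]
        have hF : findCombosFuel (rem.toNat + 1) rem pref options
            = (options.map (fun o => (rem - o, pref ++ [o]))).flatMap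
                (fun rp => findCombosFuel (rp.1.toNat + 1) rp.1 rp.2 options) := by
          have hne' : ¬ (options.length = 0 ∨ rem < 0) := by tauto
          simp only [findCombosFuel]
          rw [if_neg h0, if_neg hne']
          rw [PySem.List.foldl_append_eq_flatMap]
          rw [List.flatMap_map]
          simp only [List.nil_append]
          refine List.flatMap_congr (fun o ho => ?_)
          have hop := hpos o ho
          have hlt : (rem - o).toNat < rem.toNat := by omega
          exact fuel_stable options hpos rem.toNat (rem - o) (pref ++ [o]) hlt
        rw [hF]

-- ===== VERDICT (by name: the statement is the Claim_ definition above) =====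
theorem findCombos_spec : Claim_equal_findCombos := by
  intro steps lst options _ hpre
  unfold Spec_findCombos findCombos findCombos_alt
  rcases hpre with hle | hpos
  · -- steps ≤ 0 : both sides return directly, no recursion / no pushes
    have ht : steps.toNat = 0 := Int.toNat_of_nonpos hle
    simp only [ht, zero_add, pow_one]
    rcases eq_or_lt_of_le hle with h0 | hneg
    · subst h0
      simp [findCombosFuel, altLoop, altLoop_nil]
    · have hne : ¬ steps = 0 := by omega
      simp only [findCombosFuel, altLoop]
      rw [if_neg hne, if_pos (Or.inr hneg), if_neg hne, if_pos (Or.inl hneg), altLoop_nil]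
  · rw [altLoop_main options hpos _ _ _ (by simp)]
    simp
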